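-- pv_equiv track=rewrite | github.com/EsdrasAlbino/laboratory | python/AulaIp - Python/Recursion/recursion_5.py | rescue_princess
-- ===== SOURCE A (Python) =====
-- def rescue_princess(homes, home_current, sword, visited):
--     rupees_acumulated = 0
--     recue = False
--     princess = False
--     next_home = 0
--
--     home = homes[home_current]
--
--     rupees_acumulated = sum([1 for i in home if i == '◇'])
--     sword = sword or any("espada" in i for i in home)
--     princess = any("Zelda" in i for i in home)
--
--     if princess:
--         enime = any("Agahnim" in i for i in home)
--         if not enime or sword:
--             recue = True
--             return rupees_acumulated, recue
--
--     next_home = next((i for i in home if i.isdigit()), None)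
--     if next_home is not None:
--         next_home = int(next_home)
--         if next_home < len(homes) and next_home not in visited:
--             visited.add(home_current)
--             rupees, recue = rescue_princess(homes, next_home, sword, visited)
--             rupees_acumulated += rupees
--
--     return rupees_acumulated, recue
-- ===== SOURCE B (Python) =====
-- def rescue_princess(homes, home_current, sword, visited):
--     # Two stages instead of recursion: precompute a per-home summary table once,
--     # then walk that table iteratively. Mutates `visited` exactly like A.
--     info = [(home.count('\u25c7'),
--              any('espada' in s for s in home),
--              any('Zelda' in s for s in home),
--              any('Agahnim' in s for s in home),
--              next((int(s) for s in home if s.isdigit()), None))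
--             for home in homes]
--     total = 0
--     current = home_current
--     while True:
--         rupees, sw, zelda, agahnim, nxt = info[current]
--         total += rupees
--         sword = sword or sw
--         if zelda and (sword or not agahnim):
--             return total, True
--         if nxt is None or nxt >= len(homes) or nxt in visited:
--             return total, False
--         visited.add(current)
--         current = nxt
-- ===== Notes on version B (the rewrite author's own statement) =====
-- stated objective: alternative
-- what changed: Replaces the self-recursive search (sub-call rupees added after it returns) by two stages: one pass precomputing a per-home summary table (rupee count, sword/Zelda/Agahnim flags, next index), then an iterative walk over that table with a running total.
import Mathlib
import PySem

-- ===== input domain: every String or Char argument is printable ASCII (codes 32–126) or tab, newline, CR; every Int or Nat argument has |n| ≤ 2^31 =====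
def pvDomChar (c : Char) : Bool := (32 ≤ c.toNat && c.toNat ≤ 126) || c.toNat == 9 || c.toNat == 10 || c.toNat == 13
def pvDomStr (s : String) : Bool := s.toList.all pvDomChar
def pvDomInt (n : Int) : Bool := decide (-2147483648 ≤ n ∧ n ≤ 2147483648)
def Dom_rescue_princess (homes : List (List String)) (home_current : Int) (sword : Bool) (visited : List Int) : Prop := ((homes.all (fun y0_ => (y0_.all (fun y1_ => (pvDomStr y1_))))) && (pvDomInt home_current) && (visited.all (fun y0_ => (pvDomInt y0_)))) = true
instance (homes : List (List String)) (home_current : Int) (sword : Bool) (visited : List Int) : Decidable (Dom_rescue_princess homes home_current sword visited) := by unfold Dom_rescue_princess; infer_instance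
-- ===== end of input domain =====

-- B replaces A's recursion by a staged pipeline: one pass summarizing every home, then an
-- iterative walk over the summary table. Equivalence is about the RETURN value (both Pythons
-- mutate `visited` identically). Fuel only makes the functions total in Lean; it is never
-- exhausted on real runs (the visited set bounds the walk).

-- ===== PORT A =====
-- A is recursive: rupees of the sub-call are added AFTER it returns.
def rescue_princessGo (homes : List (List String)) : Nat → Int → Bool → PySem.Set Int → Int × Bool
  | 0, _, _, _ => (0, false)
  | fuel+1, home_current, sword, visited =>
    match PySem.List.pyGet? homes home_current with
    | none => (0, false)   -- IndexError; excluded by Pre_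
    | some home =>
      let rupees_acumulated : Int := ((home.filter (fun i => i == "◇")).length : Int)
      let sword := sword || home.any (fun i => PySem.Str.isIn "espada" i)
      let princess := home.any (fun i => PySem.Str.isIn "Zelda" i)
      if princess && (!(home.any (fun i => PySem.Str.isIn "Agahnim" i)) || sword) then
        (rupees_acumulated, true)
      else
        match home.find? (fun i => PySem.Str.strIsdigit i) with
        | none => (rupees_acumulated, false)
        | some next_home =>
          let nh := (PySem.Int.ofStr? next_home).getD 0   -- int(next_home); digits, so never none
          if nh < (homes.length : Int) ∧ ¬ (PySem.Set.contains visited nh = true) then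
            let r := rescue_princessGo homes fuel nh sword (PySem.Set.add visited home_current)
            (rupees_acumulated + r.1, r.2)
          else (rupees_acumulated, false)

def rescue_princess (homes : List (List String)) (home_current : Int) (sword : Bool) (visited : List Int) : Int × Bool :=
  rescue_princessGo homes (2 * homes.length + 8) home_current sword (PySem.Set.ofList visited)

-- ===== PORT B =====
-- Stage 1: per-home summary (rupee count, espada/Zelda/Agahnim flags, next index).
def homeInfo (home : List String) : Int × Bool × Bool × Bool × Option Int :=
  ((PySem.List.count home "◇" : Int),
   home.any (fun s => PySem.Str.isIn "espada" s),
   home.any (fun s => PySem.Str.isIn "Zelda" s),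
   home.any (fun s => PySem.Str.isIn "Agahnim" s),
   (home.find? (fun s => PySem.Str.strIsdigit s)).map (fun s => (PySem.Int.ofStr? s).getD 0))

-- Stage 2: iterative walk over the table with a running total.
def rescue_princessWalk (n : Int) (info : List (Int × Bool × Bool × Bool × Option Int)) :
    Nat → Int → Int → Bool → PySem.Set Int → Int × Bool
  | 0, total, _, _, _ => (total, false)
  | fuel+1, total, current, sword, visited =>
    match PySem.List.pyGet? info current with
    | none => (total, false)   -- IndexError; excluded by Pre_
    | some (rupees, sw, zelda, agahnim, nxt) =>
      let total := total + rupees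
      let sword := sword || sw
      if zelda && (sword || !agahnim) then (total, true)
      else
        match nxt with
        | none => (total, false)
        | some m =>
          if (n ≤ m) ∨ (PySem.Set.contains visited m = true) then (total, false)
          else rescue_princessWalk n info fuel total m sword (PySem.Set.add visited current)

def rescue_princess_alt (homes : List (List String)) (home_current : Int) (sword : Bool) (visited : List Int) : Int × Bool :=
  rescue_princessWalk (homes.length : Int) (homes.map homeInfo) (2 * homes.length + 8) 0 home_current sword (PySem.Set.ofList visited)

-- ===== PRECONDITION & SPEC =====
-- Pre_ excludes exactly the inputs where A raises IndexError: the initial index out of range.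
def Pre_rescue_princess (homes : List (List String)) (home_current : Int) (sword : Bool) (visited : List Int) : Prop :=
  PySem.Raise.InRange homes.length home_current
instance (homes : List (List String)) (home_current : Int) (sword : Bool) (visited : List Int) : Decidable (Pre_rescue_princess homes home_current sword visited) := by unfold Pre_rescue_princess; infer_instance

def pvWitness_rescue_princess : List (List String) × Int × Bool × List Int :=
  ([["1", "espada"], ["Zelda"]], 0, false, [])

def Spec_rescue_princess (homes : List (List String)) (home_current : Int) (sword : Bool) (visited : List Int) (out : Int × Bool) : Prop := out = rescue_princess_alt homes home_current sword visited
instance (homes : List (List String)) (home_current : Int) (sword : Bool) (visited : List Int) (out : Int × Bool) : Decidable (Spec_rescue_princess homes home_current sword visited out) := by unfold Spec_rescue_princess; infer_instance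

-- ===== CLAIM (what is proved, stated in full; the proofs are below) =====
def Claim_equal_rescue_princess : Prop := ∀ (homes : List (List String)) (home_current : Int) (sword : Bool) (visited : List Int), Dom_rescue_princess homes home_current sword visited → Pre_rescue_princess homes home_current sword visited → Spec_rescue_princess homes home_current sword visited (rescue_princess homes home_current sword visited)

-- ===== LEMMAS AND PROOFS =====

-- Indexing the summary table = summarizing the indexed home.
lemma pyGet?_map_homeInfo (homes : List (List String)) (i : Int) :
    PySem.List.pyGet? (homes.map homeInfo) i = (PySem.List.pyGet? homes i).map homeInfo := by
  simp [PySem.List.pyGet?, PySem.List.pyIdx?]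

-- The walk over the table with accumulator `total` computes `total +` A's recursion, same flag.
lemma walk_eq_go (homes : List (List String)) :
    ∀ (fuel : Nat) (total current : Int) (sword : Bool) (visited : PySem.Set Int),
      rescue_princessWalk (homes.length : Int) (homes.map homeInfo) fuel total current sword visited =
        (total + (rescue_princessGo homes fuel current sword visited).1,
         (rescue_princessGo homes fuel current sword visited).2) := by
  intro fuel
  induction fuel with
  | zero => intro total current sword visited; simp [rescue_princessWalk, rescue_princessGo]
  | succ f ih =>
    intro total current sword visited
    simp only [rescue_princessWalk, rescue_princessGo, pyGet?_map_homeInfo]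
    cases hget : PySem.List.pyGet? homes current with
    | none => simp
    | some home =>
      simp only [Option.map_some, homeInfo]
      have hcnt : (PySem.List.count home "◇" : Int)
          = ((home.filter (fun i => i == "◇")).length : Int) := by
        simp [PySem.List.count_eq, List.count_eq_countP, List.countP_eq_length_filter]
      simp only [hcnt, Bool.or_comm]
      split
      · rfl
      · cases hfind : home.find? (fun s => PySem.Str.strIsdigit s) with
        | none => rfl
        | some nxt =>
          simp only [Option.map_some]
          by_cases hc : ((PySem.Int.ofStr? nxt).getD 0) < (homes.length : Int) ∧
              ¬ (PySem.Set.contains visited ((PySem.Int.ofStr? nxt).getD 0) = true)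
          · have hc' : ¬ ((homes.length : Int) ≤ (PySem.Int.ofStr? nxt).getD 0 ∨
                PySem.Set.contains visited ((PySem.Int.ofStr? nxt).getD 0) = true) := by
              rcases hc with ⟨h1, h2⟩
              intro h
              rcases h with h | h
              · omega
              · exact h2 h
            rw [if_pos hc, if_neg hc', ih]
            simp [add_assoc]
          · have hc' : (homes.length : Int) ≤ (PySem.Int.ofStr? nxt).getD 0 ∨
                PySem.Set.contains visited ((PySem.Int.ofStr? nxt).getD 0) = true := by
              by_contra h
              push Not at h
              exact hc ⟨by omega, by simpa using h.2⟩
            rw [if_neg hc, if_pos hc']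

-- ===== VERDICT (by name: the statement is the Claim_ definition above) =====
theorem rescue_princess_spec : Claim_equal_rescue_princess := by
  intro homes home_current sword visited _ _
  unfold Spec_rescue_princess rescue_princess rescue_princess_alt
  rw [walk_eq_go]
  simp
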